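-- pv_equiv track=rewrite | github.com/DinoHub/appstore-ai | ai-model/inference-engine/inference_engine/utils/generate_engine.py | generate_tag_name
-- ===== SOURCE A (Python) =====
-- def generate_tag_name(name: str, version: str) -> str:
--     # Remove alphanumeric
--     name = "-".join(
--         [
--             "".join(char for char in word if char.isalnum())
--             for word in name.split(" ")
--         ]
--     ).lower()
--     version = "-".join(
--         [
--             "".join(char for char in word if char.isalnum())
--             for word in version.split(" ")
--         ]
--     ).lower()
--     tag_name = "ie-" + name + ":" + version
--     tag_name = tag_name[:128]  # Docker limits max length
--     return tag_name
-- ===== SOURCE B (Python) =====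
-- def _clean(s: str) -> str:
--     # one flat pass: space -> '-', alphanumeric kept, everything else dropped
--     return "".join(
--         "-" if c == " " else c for c in s if c == " " or c.isalnum()
--     ).lower()
--
--
-- def generate_tag_name(name: str, version: str) -> str:
--     return ("ie-" + _clean(name) + ":" + _clean(version))[:128]
-- ===== Notes on version B (the rewrite author's own statement) =====
-- stated objective: simpler
-- what changed: Replaced the split-on-space / per-word alphanumeric filter / join-with-'-' pipeline by one flat per-character pass (space -> '-', alphanumeric kept, others dropped) factored into a single helper used for both name and version.
import Mathlib
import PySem

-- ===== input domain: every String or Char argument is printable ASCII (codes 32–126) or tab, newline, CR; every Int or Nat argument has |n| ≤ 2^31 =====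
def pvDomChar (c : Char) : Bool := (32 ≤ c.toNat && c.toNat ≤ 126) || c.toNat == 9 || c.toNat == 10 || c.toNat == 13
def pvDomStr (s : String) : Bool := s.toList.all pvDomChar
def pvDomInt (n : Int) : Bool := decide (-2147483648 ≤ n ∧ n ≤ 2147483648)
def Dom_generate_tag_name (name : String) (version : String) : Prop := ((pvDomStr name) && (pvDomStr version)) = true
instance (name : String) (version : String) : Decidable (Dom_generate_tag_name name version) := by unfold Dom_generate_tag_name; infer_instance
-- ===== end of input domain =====

-- B replaces A's split/filter/join word pipeline with a single flat per-character pass (simpler decomposition, same cost).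

-- ===== PORT A =====
-- "-".join("".join(char for char in word if char.isalnum()) for word in s.split(" ")).lower()
def sanitizeA (s : String) : String :=
  PySem.Str.lower
    (PySem.Str.join "-"
      (((PySem.Str.split? s " ").getD []).map
        (fun w => String.ofList (w.toList.filter PySem.Chars.isalnum))))

def generate_tag_name (name : String) (version : String) : String :=
  PySem.Str.slice
    (String.ofList ("ie-".toList ++ (sanitizeA name).toList ++ ":".toList ++ (sanitizeA version).toList))
    none (some 128)

-- ===== PORT B =====
-- flat pass: space -> '-', alphanumeric kept, everything else dropped; then lower
def cleanChars (s : List Char) : List Char :=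
  s.flatMap (fun c => if c = ' ' then ['-'] else if PySem.Chars.isalnum c then [c] else [])

def cleanB (s : String) : String :=
  PySem.Str.lower (String.ofList (cleanChars s.toList))

def generate_tag_name_alt (name : String) (version : String) : String :=
  PySem.Str.slice
    (String.ofList ("ie-".toList ++ (cleanB name).toList ++ ":".toList ++ (cleanB version).toList))
    none (some 128)

-- ===== PRECONDITION & SPEC =====
def Spec_generate_tag_name (name : String) (version : String) (out : String) : Prop := out = generate_tag_name_alt name version
instance (name : String) (version : String) (out : String) : Decidable (Spec_generate_tag_name name version out) := by unfold Spec_generate_tag_name; infer_instance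

-- ===== CLAIM (what is proved, stated in full; the proofs are below) =====
def Claim_equal_generate_tag_name : Prop := ∀ (name : String) (version : String), Dom_generate_tag_name name version → Spec_generate_tag_name name version (generate_tag_name name version)

-- ===== LEMMAS AND PROOFS =====

-- denotational description of PySem.Chars.splitOn on the one-char separator [' ']
def mySplit : List Char → List (List Char)
  | [] => [[]]
  | c :: s => if c = ' ' then [] :: mySplit s
              else ((c :: (mySplit s).headI) :: (mySplit s).tail)

theorem mySplit_ne_nil (s : List Char) : mySplit s ≠ [] := by
  cases s with
  | nil => simp [mySplit]
  | cons c s => simp only [mySplit]; split_ifs <;> simp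

-- prepend a prefix to the first part
def consHead (pre : List Char) : List (List Char) → List (List Char)
  | [] => [pre]
  | p :: ps => (pre ++ p) :: ps

theorem go_eq (l : List Char) : ∀ (fuel : Nat) (cur : List Char) (parts : List (List Char)),
    l.length < fuel →
    PySem.Chars.splitOn.go [' '] fuel l cur parts = parts.reverse ++ consHead cur.reverse (mySplit l) := by
  induction l with
  | nil =>
    intro fuel cur parts h
    cases fuel with
    | zero => omega
    | succ f => simp [PySem.Chars.splitOn.go, mySplit, consHead]
  | cons c rest ih =>
    intro fuel cur parts h
    cases fuel with
    | zero => omega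
    | succ f =>
      by_cases hc : c = ' '
      · subst hc
        have hstep : PySem.Chars.splitOn.go [' '] (f+1) (' '::rest) cur parts
            = PySem.Chars.splitOn.go [' '] f rest [] (cur.reverse :: parts) := by
          simp [PySem.Chars.splitOn.go, List.isPrefixOf]
        rw [hstep, ih f [] (cur.reverse :: parts) (by simpa using Nat.lt_of_succ_lt_succ h)]
        have h3 : consHead ([] : List Char).reverse (mySplit rest) = mySplit rest := by
          cases hms : mySplit rest with
          | nil => exact absurd hms (mySplit_ne_nil rest)
          | cons p ps => simp [consHead]
        rw [h3]
        simp [mySplit, consHead]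
      · have hstep : PySem.Chars.splitOn.go [' '] (f+1) (c::rest) cur parts
            = PySem.Chars.splitOn.go [' '] f rest (c :: cur) parts := by
          simp [PySem.Chars.splitOn.go, List.isPrefixOf, Ne.symm hc]
        rw [hstep, ih f (c :: cur) parts (by simpa using Nat.lt_of_succ_lt_succ h)]
        cases hms : mySplit rest with
        | nil => exact absurd hms (mySplit_ne_nil rest)
        | cons p ps => simp [mySplit, hc, consHead, hms]

theorem splitOn_eq_mySplit (s : List Char) : PySem.Chars.splitOn s [' '] = mySplit s := by
  have h := go_eq s (s.length + 1) [] ([] : List (List Char)) (by omega)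
  rw [PySem.Chars.splitOn, h]
  cases hms : mySplit s with
  | nil => exact absurd hms (mySplit_ne_nil s)
  | cons p ps => simp [consHead]

theorem join_cons (p : List Char) (ps : List (List Char)) :
    PySem.Chars.join ['-'] (p :: ps)
      = p ++ (if ps = [] then [] else '-' :: PySem.Chars.join ['-'] ps) := by
  cases ps with
  | nil => simp [PySem.Chars.join, List.intercalate]
  | cons q qs => simp [PySem.Chars.join, List.intercalate, List.intersperse]

-- the heart of the equivalence: word-pipeline = flat pass, on char lists
theorem join_filter_eq_clean (s : List Char) :
    PySem.Chars.join ['-'] ((mySplit s).map (List.filter PySem.Chars.isalnum)) = cleanChars s := by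
  induction s with
  | nil => simp [mySplit, cleanChars, PySem.Chars.join, List.intercalate]
  | cons c rest ih =>
    cases hms : mySplit rest with
    | nil => exact absurd hms (mySplit_ne_nil rest)
    | cons p ps =>
      by_cases hc : c = ' '
      · subst hc
        rw [show mySplit (' '::rest) = [] :: mySplit rest from by simp [mySplit]]
        rw [List.map_cons, List.filter_nil, join_cons]
        rw [if_neg (by rw [hms]; simp)]
        rw [ih]
        simp [cleanChars]
      · rw [show mySplit (c::rest) = (c :: p) :: ps from by simp [mySplit, hc, hms]]
        rw [List.map_cons, List.filter_cons]
        by_cases ha : PySem.Chars.isalnum c = true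
        · rw [if_pos ha]
          have hsplit : PySem.Chars.join ['-'] ((c :: List.filter PySem.Chars.isalnum p) :: List.map (List.filter PySem.Chars.isalnum) ps)
              = c :: PySem.Chars.join ['-'] (List.filter PySem.Chars.isalnum p :: List.map (List.filter PySem.Chars.isalnum) ps) := by
            rw [join_cons, join_cons]
            cases hps : List.map (List.filter PySem.Chars.isalnum) ps <;> simp
          rw [hsplit]
          rw [show List.filter PySem.Chars.isalnum p :: List.map (List.filter PySem.Chars.isalnum) ps
              = List.map (List.filter PySem.Chars.isalnum) (mySplit rest) from by rw [hms, List.map_cons]]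
          rw [ih]
          simp [cleanChars, hc, ha]
        · rw [if_neg ha]
          rw [show List.filter PySem.Chars.isalnum p :: List.map (List.filter PySem.Chars.isalnum) ps
              = List.map (List.filter PySem.Chars.isalnum) (mySplit rest) from by rw [hms, List.map_cons]]
          rw [ih]
          simp only [cleanChars, List.flatMap_cons, if_neg hc, if_neg ha]
          rw [← cleanChars]
          simp

theorem sanitize_eq (s : String) : sanitizeA s = cleanB s := by
  unfold sanitizeA cleanB
  congr 1
  apply String.toList_inj.mp
  have hsplit : ((PySem.Str.split? s " ").getD []).map String.toList = PySem.Chars.splitOn s.toList [' '] := by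
    have h := PySem.Str.split?_map s " "
    rw [show String.toList " " = [' '] from rfl] at h
    rw [PySem.Chars.split?] at h
    simp only [List.isEmpty_cons, Bool.false_eq_true, if_false] at h
    cases hs : PySem.Str.split? s " " with
    | none => rw [hs] at h; simp at h
    | some parts => rw [hs] at h; simpa using h
  rw [PySem.Str.toList_join]
  simp only [String.toList_ofList]
  rw [List.map_map]
  rw [show ((fun x => String.toList x) ∘ fun w => String.ofList (List.filter PySem.Chars.isalnum w.toList))
      = (List.filter PySem.Chars.isalnum ∘ String.toList) from by funext w; simp]
  rw [← List.map_map, hsplit, splitOn_eq_mySplit]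
  exact join_filter_eq_clean s.toList

-- ===== VERDICT (by name: the statement is the Claim_ definition above) =====
theorem generate_tag_name_spec : Claim_equal_generate_tag_name := by
  intro name version _
  unfold Spec_generate_tag_name generate_tag_name generate_tag_name_alt
  rw [sanitize_eq, sanitize_eq]
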